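-- pv_equiv track=rewrite | github.com/timvieira/transduction | transduction/safety.py | _backward_reachable
-- ===== SOURCE A (Python) =====
-- from collections import defaultdict, deque
--
-- def _backward_reachable(seeds, preds: dict) -> set:
--     """BFS backward reachability from ``seeds`` through ``preds``.
--
--     Args:
--         seeds: iterable of starting nodes.
--         preds: adjacency dict mapping node -> iterable of predecessor nodes.
--
--     Returns:
--         Set of all nodes reachable backward from seeds (including seeds).
--     """
--     reached = set(seeds)
--     queue = deque(seeds)
--     while queue:
--         s = queue.popleft()
--         for p in preds.get(s, ()):
--             if p not in reached:
--                 reached.add(p)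
--                 queue.append(p)
--     return reached
-- ===== SOURCE B (Python) =====
-- def _backward_reachable(seeds, preds: dict) -> set:
--     """Naive fixpoint (Datalog-style saturation) backward reachability.
--
--     No queue or frontier: repeatedly sweep the whole adjacency relation,
--     adding every predecessor of every already-reached node, until a full
--     sweep adds nothing. Correct because the reachable set is the least
--     fixpoint of 'contains seeds and is closed under predecessors', which
--     any order of saturation computes.
--     """
--     reached = set(seeds)
--     changed = True
--     while changed:
--         changed = False
--         for node in preds:
--             if node in reached:
--                 for p in preds[node]:
--                     if p not in reached:
--                         reached.add(p)
--                         changed = True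
--     return reached
-- ===== Notes on version B (the rewrite author's own statement) =====
-- stated objective: alternative
-- what changed: Replaced the deque-based BFS traversal with a Datalog-style naive fixpoint: no queue or visited frontier at all, just repeated full sweeps over the whole adjacency dict that add predecessors of already-reached nodes until one sweep changes nothing.
import Mathlib
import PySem

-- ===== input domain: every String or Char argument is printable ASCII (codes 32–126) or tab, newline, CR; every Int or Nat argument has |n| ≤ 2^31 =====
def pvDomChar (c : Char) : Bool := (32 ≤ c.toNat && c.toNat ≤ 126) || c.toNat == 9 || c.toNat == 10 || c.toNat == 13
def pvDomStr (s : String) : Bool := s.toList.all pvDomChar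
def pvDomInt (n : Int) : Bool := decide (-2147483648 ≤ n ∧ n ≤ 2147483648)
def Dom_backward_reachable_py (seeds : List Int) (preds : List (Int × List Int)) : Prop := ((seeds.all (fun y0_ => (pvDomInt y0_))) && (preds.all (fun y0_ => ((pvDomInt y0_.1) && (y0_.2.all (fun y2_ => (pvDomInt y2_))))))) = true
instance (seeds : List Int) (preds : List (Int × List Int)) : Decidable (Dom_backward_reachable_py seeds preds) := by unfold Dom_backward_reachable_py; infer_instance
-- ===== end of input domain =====

-- B replaces A's deque BFS by a Datalog-style naive fixpoint: repeated full sweeps over the whole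
-- adjacency list, adding predecessors of already-reached nodes, until a sweep changes nothing; no
-- queue or frontier. Both Pythons return a SET; both ports return its canonical sorted-list
-- representation (sets are order-free).

-- preds.get(s, ()) / preds[s] on the assoc-list model of the dict: first matching key, default [].
def brGetD (preds : List (Int × List Int)) (s : Int) : List Int :=
  ((preds.find? (fun kv => kv.1 == s)).map (fun kv => kv.2)).getD []

-- All node values occurring in the input; its size bounds |reached|, used only for the fuel guard.
def brUniv (seeds : List Int) (preds : List (Int × List Int)) : List Int :=
  PySem.Set.ofList (seeds ++ preds.flatMap (fun kv => kv.2))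

-- ===== PORT A =====
-- while queue: s = queue.popleft(); for p in preds.get(s, ()): if p not in reached: add p to both.
-- fuel is a termination guard only; bfs_main below shows it never runs out.
def bfsLoop (preds : List (Int × List Int)) : Nat → List Int → List Int → List Int
  | _, reached, [] => reached
  | 0, reached, _ :: _ => reached
  | f+1, reached, s :: q =>
    let st := (brGetD preds s).foldl
      (fun (rq : List Int × List Int) p =>
        if p ∈ rq.1 then rq else (PySem.Set.add rq.1 p, rq.2 ++ [p])) (reached, q)
    bfsLoop preds f st.1 st.2

def backward_reachable_py (seeds : List Int) (preds : List (Int × List Int)) : List Int :=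
  let reached := PySem.Set.ofList seeds                                -- reached = set(seeds)
  let fuel := 2 * (brUniv seeds preds).length + seeds.length + 1
  PySem.List.sorted (bfsLoop preds fuel reached seeds) (fun x => x)    -- the returned set, canonically sorted

-- ===== PORT B =====
-- one sweep: for node in preds: if node in reached: for p in preds[node]: if p not in reached:
-- reached.add(p); changed = True.  The dict iteration 'for node in preds: … preds[node]' is ported
-- as a fold over the pairs reading the value through the dict lookup brGetD kv.1 (= preds[node];
-- identical on every real dict, whose keys are unique).
def relaxPass (preds : List (Int × List Int)) (reached : List Int) : List Int × Bool :=
  preds.foldl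
    (fun (st : List Int × Bool) kv =>
      if kv.1 ∈ st.1 then
        (brGetD preds kv.1).foldl
          (fun (st2 : List Int × Bool) p =>
            if p ∈ st2.1 then st2 else (PySem.Set.add st2.1 p, true)) st
      else st)
    (reached, false)

-- while changed: changed = False; <one sweep>.  fuel is a termination guard only; fix_main below
-- shows it never runs out.
def fixLoop (preds : List (Int × List Int)) : Nat → List Int → List Int
  | 0, reached => reached
  | f+1, reached =>
    let st := relaxPass preds reached
    if st.2 then fixLoop preds f st.1 else st.1

def backward_reachable_py_alt (seeds : List Int) (preds : List (Int × List Int)) : List Int :=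
  let fuel := (brUniv seeds preds).length + 1
  PySem.List.sorted (fixLoop preds fuel (PySem.Set.ofList seeds)) (fun x => x)

-- ===== PRECONDITION & SPEC =====
def Spec_backward_reachable_py (seeds : List Int) (preds : List (Int × List Int)) (out : List Int) : Prop := out = backward_reachable_py_alt seeds preds
instance (seeds : List Int) (preds : List (Int × List Int)) (out : List Int) : Decidable (Spec_backward_reachable_py seeds preds out) := by unfold Spec_backward_reachable_py; infer_instance

-- ===== CLAIM (what is proved, stated in full; the proofs are below) =====
def Claim_equal_backward_reachable_py : Prop := ∀ (seeds : List Int) (preds : List (Int × List Int)), Dom_backward_reachable_py seeds preds → Spec_backward_reachable_py seeds preds (backward_reachable_py seeds preds)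

-- ===== LEMMAS AND PROOFS =====

lemma setAdd_of_not_mem {s : List Int} {p : Int} (h : p ∉ s) : PySem.Set.add s p = s ++ [p] := by
  simp [PySem.Set.add, PySem.Set.contains, h]

lemma brGetD_mem_flatMap {preds : List (Int × List Int)} {s p : Int}
    (h : p ∈ brGetD preds s) : p ∈ preds.flatMap (fun kv => kv.2) := by
  unfold brGetD at h
  cases hf : preds.find? (fun kv => kv.1 == s) with
  | none => rw [hf] at h; simp at h
  | some kv =>
    rw [hf] at h; simp at h
    exact List.mem_flatMap.2 ⟨kv, List.mem_of_find?_eq_some hf, h⟩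

lemma brGetD_key {preds : List (Int × List Int)} {s p : Int}
    (h : p ∈ brGetD preds s) : ∃ kv ∈ preds, kv.1 = s := by
  unfold brGetD at h
  cases hf : preds.find? (fun kv => kv.1 == s) with
  | none => rw [hf] at h; simp at h
  | some kv =>
    exact ⟨kv, List.mem_of_find?_eq_some hf, by simpa using List.find?_some hf⟩

lemma nodup_sub_length {l U : List Int} (hl : l.Nodup) (h : ∀ x ∈ l, x ∈ U) :
    l.length ≤ U.length := by
  calc l.length = l.toFinset.card := (List.toFinset_card_of_nodup hl).symm
    _ ≤ U.toFinset.card := Finset.card_le_card (fun x hx => by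
        simp only [List.mem_toFinset] at *; exact h x hx)
    _ ≤ U.length := U.toFinset_card_le

-- the inner 'for p in preds.get(s, ())' body of A's loop
lemma bfs_fold (ps : List Int) : ∀ (r q : List Int),
    ∃ news : List Int,
      ps.foldl (fun (rq : List Int × List Int) p =>
          if p ∈ rq.1 then rq else (PySem.Set.add rq.1 p, rq.2 ++ [p])) (r, q)
        = (r ++ news, q ++ news)
      ∧ news.Nodup ∧ (∀ x ∈ news, x ∈ ps ∧ x ∉ r) ∧ (∀ p ∈ ps, p ∈ r ++ news) := by
  induction ps with
  | nil => intro r q; exact ⟨[], by simp, by simp, by simp, by simp⟩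
  | cons p ps ih =>
    intro r q
    by_cases hp : p ∈ r
    · obtain ⟨news, heq, hnd, hmem, hall⟩ := ih r q
      refine ⟨news, by simpa [List.foldl, hp] using heq, hnd,
        fun x hx => ⟨List.mem_cons_of_mem _ (hmem x hx).1, (hmem x hx).2⟩, ?_⟩
      intro p' hp'
      rcases List.mem_cons.1 hp' with h | h
      · subst h; exact List.mem_append_left _ hp
      · exact hall p' h
    · obtain ⟨news, heq, hnd, hmem, hall⟩ := ih (r ++ [p]) (q ++ [p])
      refine ⟨p :: news, ?_, ?_, ?_, ?_⟩
      · have : (r ++ [p]) ++ news = r ++ p :: news := by simp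
        have h2 : (q ++ [p]) ++ news = q ++ p :: news := by simp
        simpa [List.foldl, hp, setAdd_of_not_mem hp, this, h2] using heq
      · refine List.nodup_cons.2 ⟨fun hc => ?_, hnd⟩
        exact (hmem p hc).2 (by simp)
      · intro x hx
        rcases List.mem_cons.1 hx with h | h
        · subst h; exact ⟨List.mem_cons_self, hp⟩
        · refine ⟨List.mem_cons_of_mem _ (hmem x h).1, fun hc => (hmem x h).2 (by simp [hc])⟩
      · intro p' hp'
        rcases List.mem_cons.1 hp' with h | h
        · subst h; simp
        · have := hall p' h
          simp only [List.append_assoc, List.singleton_append] at this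
          exact this

lemma bfs_main (preds : List (Int × List Int)) (U : List Int)
    (hG : ∀ s p, p ∈ brGetD preds s → p ∈ U) :
    ∀ (fuel : Nat) (reached queue : List Int),
      reached.Nodup → (∀ x ∈ reached, x ∈ U) → (∀ x ∈ queue, x ∈ reached) →
      (∀ x ∈ reached, x ∈ queue ∨ ∀ p ∈ brGetD preds x, p ∈ reached) →
      2 * U.length + queue.length + 1 ≤ fuel + 2 * reached.length →
      (∀ x ∈ reached, x ∈ bfsLoop preds fuel reached queue)
      ∧ (bfsLoop preds fuel reached queue).Nodup
      ∧ (∀ x ∈ bfsLoop preds fuel reached queue, x ∈ U)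
      ∧ (∀ x ∈ bfsLoop preds fuel reached queue,
           ∀ p ∈ brGetD preds x, p ∈ bfsLoop preds fuel reached queue) := by
  intro fuel
  induction fuel with
  | zero =>
    intro reached queue hnd hsub hq hinv hfuel
    cases queue with
    | nil =>
      simp only [bfsLoop]
      exact ⟨fun x hx => hx, hnd, hsub, fun x hx p hp =>
        (hinv x hx).elim (fun h => absurd h (List.not_mem_nil)) (fun h => h p hp)⟩
    | cons s q =>
      exfalso
      have := nodup_sub_length hnd hsub
      simp at hfuel; omega
  | succ f ih =>
    intro reached queue hnd hsub hq hinv hfuel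
    cases queue with
    | nil =>
      simp only [bfsLoop]
      exact ⟨fun x hx => hx, hnd, hsub, fun x hx p hp =>
        (hinv x hx).elim (fun h => absurd h (List.not_mem_nil)) (fun h => h p hp)⟩
    | cons s q =>
      obtain ⟨news, heq, hndn, hmemn, halln⟩ := bfs_fold (brGetD preds s) reached q
      have hstep : bfsLoop preds (f+1) reached (s :: q)
          = bfsLoop preds f (reached ++ news) (q ++ news) := by
        simp only [bfsLoop, heq]
      have hdisj : reached.Disjoint news := fun a ha han => (hmemn a han).2 ha
      have hnd' : (reached ++ news).Nodup := hnd.append hndn hdisj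
      have hsub' : ∀ x ∈ reached ++ news, x ∈ U := by
        intro x hx
        rcases List.mem_append.1 hx with h | h
        · exact hsub x h
        · exact hG s x (hmemn x h).1
      have hq' : ∀ x ∈ q ++ news, x ∈ reached ++ news := by
        intro x hx
        rcases List.mem_append.1 hx with h | h
        · exact List.mem_append_left _ (hq x (List.mem_cons_of_mem _ h))
        · exact List.mem_append_right _ h
      have hinv' : ∀ x ∈ reached ++ news,
          x ∈ q ++ news ∨ ∀ p ∈ brGetD preds x, p ∈ reached ++ news := by
        intro x hx
        rcases List.mem_append.1 hx with h | h
        · rcases hinv x h with h2 | h2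
          · rcases List.mem_cons.1 h2 with h3 | h3
            · subst h3; exact Or.inr halln
            · exact Or.inl (List.mem_append_left _ h3)
          · exact Or.inr (fun p hp => List.mem_append_left _ (h2 p hp))
        · exact Or.inl (List.mem_append_right _ h)
      have hfuel' : 2 * U.length + (q ++ news).length + 1 ≤ f + 2 * (reached ++ news).length := by
        simp only [List.length_append, List.length_cons] at *
        omega
      obtain ⟨c1, c2, c3, c4⟩ := ih (reached ++ news) (q ++ news) hnd' hsub' hq' hinv' hfuel'
      rw [hstep]
      exact ⟨fun x hx => c1 x (List.mem_append_left _ hx), c2, c3, c4⟩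

lemma bfs_sound (preds : List (Int × List Int)) (P : Int → Prop)
    (hstep : ∀ s p, P s → p ∈ brGetD preds s → P p) :
    ∀ (fuel : Nat) (reached queue : List Int),
      (∀ x ∈ reached, P x) → (∀ x ∈ queue, x ∈ reached) →
      ∀ x ∈ bfsLoop preds fuel reached queue, P x := by
  intro fuel
  induction fuel with
  | zero =>
    intro reached queue hP hq x hx
    cases queue with
    | nil => exact hP x (by simpa [bfsLoop] using hx)
    | cons s q => exact hP x (by simpa [bfsLoop] using hx)
  | succ f ih =>
    intro reached queue hP hq x hx
    cases queue with
    | nil => exact hP x (by simpa [bfsLoop] using hx)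
    | cons s q =>
      obtain ⟨news, heq, hndn, hmemn, halln⟩ := bfs_fold (brGetD preds s) reached q
      have hstep' : bfsLoop preds (f+1) reached (s :: q)
          = bfsLoop preds f (reached ++ news) (q ++ news) := by
        simp only [bfsLoop, heq]
      rw [hstep'] at hx
      have hPs : P s := hP s (hq s List.mem_cons_self)
      have hP' : ∀ y ∈ reached ++ news, P y := by
        intro y hy
        rcases List.mem_append.1 hy with h | h
        · exact hP y h
        · exact hstep s y hPs (hmemn y h).1
      have hq' : ∀ y ∈ q ++ news, y ∈ reached ++ news := by
        intro y hy
        rcases List.mem_append.1 hy with h | h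
        · exact List.mem_append_left _ (hq y (List.mem_cons_of_mem _ h))
        · exact List.mem_append_right _ h
      exact ih (reached ++ news) (q ++ news) hP' hq' x hx

-- the inner 'for p in preds[node]' loop of one sweep of B
lemma relax_inner (ps : List Int) : ∀ (r : List Int) (b : Bool),
    ∃ news : List Int,
      ps.foldl (fun (st2 : List Int × Bool) p =>
          if p ∈ st2.1 then st2 else (PySem.Set.add st2.1 p, true)) (r, b)
        = (r ++ news, b || !news.isEmpty)
      ∧ news.Nodup ∧ (∀ x ∈ news, x ∉ r ∧ x ∈ ps) ∧ (∀ p ∈ ps, p ∈ r ++ news) := by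
  induction ps with
  | nil => intro r b; exact ⟨[], by simp, by simp, by simp, by simp⟩
  | cons p ps ih =>
    intro r b
    by_cases hp : p ∈ r
    · obtain ⟨news, heq, hnd, hmem, hall⟩ := ih r b
      refine ⟨news, by simpa [List.foldl, hp] using heq, hnd,
        fun x hx => ⟨(hmem x hx).1, List.mem_cons_of_mem _ (hmem x hx).2⟩, ?_⟩
      intro p' hp'
      rcases List.mem_cons.1 hp' with h | h
      · subst h; exact List.mem_append_left _ hp
      · exact hall p' h
    · obtain ⟨news, heq, hnd, hmem, hall⟩ := ih (r ++ [p]) true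
      refine ⟨p :: news, ?_, ?_, ?_, ?_⟩
      · have h1 : (r ++ [p]) ++ news = r ++ p :: news := by simp
        simpa [List.foldl, hp, setAdd_of_not_mem hp, h1, List.isEmpty] using heq
      · refine List.nodup_cons.2 ⟨fun hc => ?_, hnd⟩
        exact (hmem p hc).1 (by simp)
      · intro x hx
        rcases List.mem_cons.1 hx with h | h
        · subst h; exact ⟨hp, List.mem_cons_self⟩
        · exact ⟨fun hc => (hmem x h).1 (by simp [hc]), List.mem_cons_of_mem _ (hmem x h).2⟩
      · intro p' hp'
        rcases List.mem_cons.1 hp' with h | h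
        · subst h; simp
        · have := hall p' h
          simp only [List.append_assoc, List.singleton_append] at this
          exact this

-- one whole sweep of B ('for node in preds: …') started from any prefix state
lemma relax_outer (preds : List (Int × List Int)) :
    ∀ (L : List (Int × List Int)) (r : List Int) (b : Bool),
    ∃ news : List Int,
      L.foldl (fun (st : List Int × Bool) kv =>
          if kv.1 ∈ st.1 then
            (brGetD preds kv.1).foldl (fun (st2 : List Int × Bool) p =>
              if p ∈ st2.1 then st2 else (PySem.Set.add st2.1 p, true)) st
          else st) (r, b)
        = (r ++ news, b || !news.isEmpty)
      ∧ news.Nodup ∧ (∀ x ∈ news, x ∉ r ∧ ∃ s, x ∈ brGetD preds s)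
      ∧ (news = [] → ∀ kv ∈ L, kv.1 ∈ r → ∀ p ∈ brGetD preds kv.1, p ∈ r) := by
  intro L
  induction L with
  | nil => intro r b; exact ⟨[], by simp, by simp, by simp, by simp⟩
  | cons kv L ih =>
    intro r b
    by_cases hk : kv.1 ∈ r
    · obtain ⟨n1, heq1, hnd1, hmem1, hall1⟩ := relax_inner (brGetD preds kv.1) r b
      obtain ⟨n2, heq2, hnd2, hmem2, hcl2⟩ := ih (r ++ n1) (b || !n1.isEmpty)
      refine ⟨n1 ++ n2, ?_, ?_, ?_, ?_⟩
      · have h1 : (r ++ n1) ++ n2 = r ++ (n1 ++ n2) := by simp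
        have h2 : ((b || !n1.isEmpty) || !n2.isEmpty) = (b || !(n1 ++ n2).isEmpty) := by
          cases n1 <;> cases n2 <;> simp [List.isEmpty]
        simp only [List.foldl, if_pos hk, heq1, heq2, h1, h2]
      · refine hnd1.append hnd2 (fun a ha han => ?_)
        exact (hmem2 a han).1 (List.mem_append_right _ ha)
      · intro x hx
        rcases List.mem_append.1 hx with h | h
        · exact ⟨(hmem1 x h).1, kv.1, (hmem1 x h).2⟩
        · exact ⟨fun hc => (hmem2 x h).1 (List.mem_append_left _ hc), (hmem2 x h).2⟩
      · intro hnil kv' hkv' hk' p hp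
        obtain ⟨h1, h2⟩ := List.append_eq_nil_iff.mp hnil
        rcases List.mem_cons.1 hkv' with h | h
        · subst h
          have := hall1 p hp
          simpa [h1] using this
        · have := hcl2 h2 kv' h (by simpa [h1] using List.mem_append_left n1 hk') p hp
          simpa [h1] using this
    · obtain ⟨news, heq, hnd, hmem, hcl⟩ := ih r b
      refine ⟨news, by simpa [List.foldl, hk] using heq, hnd, hmem, ?_⟩
      intro hnil kv' hkv' hk' p hp
      rcases List.mem_cons.1 hkv' with h | h
      · subst h; exact absurd hk' hk
      · exact hcl hnil kv' h hk' p hp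

lemma fix_main (preds : List (Int × List Int)) (U : List Int)
    (hG : ∀ s p, p ∈ brGetD preds s → p ∈ U) :
    ∀ (fuel : Nat) (reached : List Int),
      reached.Nodup → (∀ x ∈ reached, x ∈ U) →
      U.length + 1 ≤ fuel + reached.length →
      (∀ x ∈ reached, x ∈ fixLoop preds fuel reached)
      ∧ (fixLoop preds fuel reached).Nodup
      ∧ (∀ x ∈ fixLoop preds fuel reached, x ∈ U)
      ∧ (∀ x ∈ fixLoop preds fuel reached,
           ∀ p ∈ brGetD preds x, p ∈ fixLoop preds fuel reached) := by
  intro fuel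
  induction fuel with
  | zero =>
    intro reached hnd hsub hfuel
    exfalso
    have := nodup_sub_length hnd hsub
    omega
  | succ f ih =>
    intro reached hnd hsub hfuel
    obtain ⟨news, heq, hndn, hmemn, hcl⟩ := relax_outer preds preds reached false
    cases hn : news with
    | nil =>
      have hres : fixLoop preds (f+1) reached = reached := by
        simp only [fixLoop, relaxPass, heq, hn]
        simp [List.isEmpty]
      rw [hres]
      refine ⟨fun x hx => hx, hnd, hsub, ?_⟩
      intro x hx p hp
      obtain ⟨kv, hkv, hkx⟩ := brGetD_key hp
      exact hcl hn kv hkv (hkx ▸ hx) p (hkx ▸ hp)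
    | cons a l =>
      have hres : fixLoop preds (f+1) reached = fixLoop preds f (reached ++ news) := by
        simp only [fixLoop, relaxPass, heq, hn]
        simp [List.isEmpty]
      have hdisj : reached.Disjoint news := fun x hx hxn => (hmemn x hxn).1 hx
      have hnd' : (reached ++ news).Nodup := hnd.append hndn hdisj
      have hsub' : ∀ x ∈ reached ++ news, x ∈ U := by
        intro x hx
        rcases List.mem_append.1 hx with h | h
        · exact hsub x h
        · obtain ⟨_, s, hs⟩ := hmemn x h
          exact hG s x hs
      have hfuel' : U.length + 1 ≤ f + (reached ++ news).length := by
        simp only [List.length_append, hn, List.length_cons]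
        omega
      obtain ⟨c1, c2, c3, c4⟩ := ih (reached ++ news) hnd' hsub' hfuel'
      rw [hres]
      exact ⟨fun x hx => c1 x (List.mem_append_left _ hx), c2, c3, c4⟩

-- soundness of one sweep under a predecessor-closed predicate
lemma relax_sound_inner (P : Int → Prop) (ps : List Int) :
    ∀ (st : List Int × Bool), (∀ x ∈ st.1, P x) → (∀ p ∈ ps, P p) →
      ∀ x ∈ (ps.foldl (fun (st2 : List Int × Bool) p =>
          if p ∈ st2.1 then st2 else (PySem.Set.add st2.1 p, true)) st).1, P x := by
  induction ps with
  | nil => intro st hst _ x hx; exact hst x hx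
  | cons p ps ih =>
    intro st hst hps x hx
    by_cases hp : p ∈ st.1
    · exact ih st hst (fun q hq => hps q (List.mem_cons_of_mem _ hq)) x
        (by simpa [List.foldl, hp] using hx)
    · refine ih (PySem.Set.add st.1 p, true) ?_ (fun q hq => hps q (List.mem_cons_of_mem _ hq)) x
        (by simpa [List.foldl, hp] using hx)
      intro y hy
      rcases (PySem.Set.mem_add st.1 p y).1 hy with h | h
      · exact hst y h
      · subst h; exact hps y List.mem_cons_self
  
lemma relax_sound (preds : List (Int × List Int)) (P : Int → Prop)
    (hstep : ∀ s p, P s → p ∈ brGetD preds s → P p) :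
    ∀ (L : List (Int × List Int)) (st : List Int × Bool), (∀ x ∈ st.1, P x) →
      ∀ x ∈ (L.foldl (fun (st : List Int × Bool) kv =>
          if kv.1 ∈ st.1 then
            (brGetD preds kv.1).foldl (fun (st2 : List Int × Bool) p =>
              if p ∈ st2.1 then st2 else (PySem.Set.add st2.1 p, true)) st
          else st) st).1, P x := by
  intro L
  induction L with
  | nil => intro st hst x hx; exact hst x hx
  | cons kv L ih =>
    intro st hst x hx
    by_cases hk : kv.1 ∈ st.1
    · refine ih _ ?_ x (by simpa [List.foldl, hk] using hx)
      exact relax_sound_inner P (brGetD preds kv.1) st hst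
        (fun p hp => hstep kv.1 p (hst _ hk) hp)
    · exact ih st hst x (by simpa [List.foldl, hk] using hx)

lemma fix_sound (preds : List (Int × List Int)) (P : Int → Prop)
    (hstep : ∀ s p, P s → p ∈ brGetD preds s → P p) :
    ∀ (fuel : Nat) (reached : List Int), (∀ x ∈ reached, P x) →
      ∀ x ∈ fixLoop preds fuel reached, P x := by
  intro fuel
  induction fuel with
  | zero => intro reached hP x hx; exact hP x (by simpa [fixLoop] using hx)
  | succ f ih =>
    intro reached hP x hx
    have hall : ∀ y ∈ (relaxPass preds reached).1, P y :=
      relax_sound preds P hstep preds (reached, false) hP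
    simp only [fixLoop] at hx
    by_cases hb : (relaxPass preds reached).2
    · rw [if_pos hb] at hx
      exact ih (relaxPass preds reached).1 hall x hx
    · rw [if_neg hb] at hx
      exact hall x hx

-- ===== VERDICT (by name: the statement is the Claim_ definition above) =====
theorem backward_reachable_py_spec : Claim_equal_backward_reachable_py := by
  intro seeds preds _
  unfold Spec_backward_reachable_py backward_reachable_py backward_reachable_py_alt
  have hG : ∀ s p, p ∈ brGetD preds s → p ∈ brUniv seeds preds := by
    intro s p hp
    exact (PySem.Set.mem_ofList _ _).2 (List.mem_append_right _ (brGetD_mem_flatMap hp))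
  have hseedU : ∀ x ∈ PySem.Set.ofList seeds, x ∈ brUniv seeds preds := by
    intro x hx
    exact (PySem.Set.mem_ofList _ _).2
      (List.mem_append_left _ ((PySem.Set.mem_ofList _ _).1 hx))
  obtain ⟨a1, a2, a3, a4⟩ := bfs_main preds (brUniv seeds preds) hG
    (2 * (brUniv seeds preds).length + seeds.length + 1) (PySem.Set.ofList seeds) seeds
    (PySem.Set.nodup_ofList seeds) hseedU
    (fun x hx => (PySem.Set.mem_ofList _ _).2 hx)
    (fun x hx => Or.inl ((PySem.Set.mem_ofList _ _).1 hx))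
    (by omega)
  obtain ⟨b1, b2, b3, b4⟩ := fix_main preds (brUniv seeds preds) hG
    ((brUniv seeds preds).length + 1) (PySem.Set.ofList seeds)
    (PySem.Set.nodup_ofList seeds) hseedU (by omega)
  have hAB : ∀ x ∈ bfsLoop preds (2 * (brUniv seeds preds).length + seeds.length + 1)
      (PySem.Set.ofList seeds) seeds,
      x ∈ fixLoop preds ((brUniv seeds preds).length + 1) (PySem.Set.ofList seeds) :=
    bfs_sound preds _ (fun s p hs hp => b4 _ hs p hp) _ _ _
      b1 (fun x hx => (PySem.Set.mem_ofList _ _).2 hx)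
  have hBA : ∀ x ∈ fixLoop preds ((brUniv seeds preds).length + 1) (PySem.Set.ofList seeds),
      x ∈ bfsLoop preds (2 * (brUniv seeds preds).length + seeds.length + 1)
      (PySem.Set.ofList seeds) seeds :=
    fix_sound preds _ (fun s p hs hp => a4 _ hs p hp) _ _ a1
  have hperm : (bfsLoop preds (2 * (brUniv seeds preds).length + seeds.length + 1)
      (PySem.Set.ofList seeds) seeds).Perm
      (fixLoop preds ((brUniv seeds preds).length + 1) (PySem.Set.ofList seeds)) :=
    (List.perm_ext_iff_of_nodup a2 b2).2 (fun x => ⟨hAB x, hBA x⟩)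
  exact PySem.List.sorted_eq_sorted_of_perm _ _ (fun x => x) (fun a b h => h) hperm
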